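-- pv_equiv track=rewrite | github.com/Shreyas-repo/NPC_fuzzy_system_game | entities/npc.py | _state_from_routine_activity
-- ===== SOURCE A (Python) =====
-- class NPCState:
--     IDLE = "idle"
--     WALKING = "walking"
--     WORKING = "working"
--     SOCIALIZING = "socializing"
--     SLEEPING = "sleeping"
--     EATING = "eating"
--     TALKING_TO_PLAYER = "talking"
--
-- def _state_from_routine_activity(activity_text, zone_name):
--     """Map scheduled activity labels to concrete NPC states."""
--     text = str(activity_text or "").lower()
--
--     if any(k in text for k in ("sleep", "rest", "retire", "chambers", "go home", "return home")):
--         return NPCState.SLEEPING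
--     if any(k in text for k in ("lunch", "meal", "eat", "dinner", "breakfast")):
--         return NPCState.EATING
--     if any(k in text for k in ("social", "visit", "stories", "tales", "prayer", "appearance", "explore")):
--         return NPCState.SOCIALIZING
--     if any(k in text for k in ("work", "duty", "patrol", "training", "drills", "trade", "forg", "harvest", "field", "chores", "tasks", "business", "court")):
--         return NPCState.WORKING
--
--     # Sensible fallback by zone type.
--     if zone_name == "town_square":
--         return NPCState.SOCIALIZING
--     if zone_name and zone_name.startswith(("noble_house_", "peasant_house_", "trader_house_")):
--         return NPCState.SLEEPING
--     return NPCState.WORKING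
-- ===== SOURCE B (Python) =====
-- # Priority-minimum re-implementation: one accumulator pass over a flat keyword->priority
-- # table computes the smallest-priority match; no early returns, no per-group branches.
-- _KEYWORD_PRIORITY = {
--     "sleep": 0, "rest": 0, "retire": 0, "chambers": 0, "go home": 0, "return home": 0,
--     "lunch": 1, "meal": 1, "eat": 1, "dinner": 1, "breakfast": 1,
--     "social": 2, "visit": 2, "stories": 2, "tales": 2, "prayer": 2, "appearance": 2, "explore": 2,
--     "work": 3, "duty": 3, "patrol": 3, "training": 3, "drills": 3, "trade": 3, "forg": 3,
--     "harvest": 3, "field": 3, "chores": 3, "tasks": 3, "business": 3, "court": 3,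
-- }
-- _STATES = ("sleeping", "eating", "socializing", "working")
--
-- def _state_from_routine_activity(activity_text, zone_name):
--     text = str(activity_text or "").lower()
--     best = len(_STATES)  # sentinel: no keyword matched
--     for k, p in _KEYWORD_PRIORITY.items():
--         if p < best and k in text:
--             best = p
--     if best < len(_STATES):
--         return _STATES[best]
--     zone = zone_name or ""
--     if zone == "town_square":
--         return "socializing"
--     if zone.startswith(("noble_house_", "peasant_house_", "trader_house_")):
--         return "sleeping"
--     return "working"
-- ===== Notes on version B (the rewrite author's own statement) =====
-- stated objective: alternative
-- what changed: Replaces the unrolled early-return if-chain over keyword groups with a single accumulator pass over a flat keyword->priority map that computes the minimum matching priority, then indexes a state table; the zone fallback is normalised through one 'zone = zone_name or ""' coercion.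
import Mathlib
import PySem

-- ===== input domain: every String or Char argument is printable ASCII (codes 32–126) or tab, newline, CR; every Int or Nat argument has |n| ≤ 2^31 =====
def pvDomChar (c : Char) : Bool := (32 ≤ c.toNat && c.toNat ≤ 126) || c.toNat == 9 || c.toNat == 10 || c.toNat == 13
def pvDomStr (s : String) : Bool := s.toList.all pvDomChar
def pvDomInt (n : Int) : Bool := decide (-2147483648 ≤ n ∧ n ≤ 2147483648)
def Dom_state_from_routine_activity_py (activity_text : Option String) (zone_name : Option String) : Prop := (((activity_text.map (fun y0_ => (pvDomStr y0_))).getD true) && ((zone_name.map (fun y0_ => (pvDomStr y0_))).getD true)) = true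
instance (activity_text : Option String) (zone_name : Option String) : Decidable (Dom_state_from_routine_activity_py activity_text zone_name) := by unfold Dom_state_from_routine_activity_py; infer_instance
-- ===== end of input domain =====

-- B replaces A's early-return if-chain with one accumulator pass over a flat keyword→priority
-- table computing the minimum matching priority, then a state-table lookup (alternative; same cost).

-- ===== PORT A =====
def state_from_routine_activity_py (activity_text : Option String) (zone_name : Option String) : String :=
  let text := PySem.Str.lower (activity_text.getD "")
  if (["sleep", "rest", "retire", "chambers", "go home", "return home"].any
      (fun k => PySem.Str.isIn k text)) then "sleeping"
  else if (["lunch", "meal", "eat", "dinner", "breakfast"].any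
      (fun k => PySem.Str.isIn k text)) then "eating"
  else if (["social", "visit", "stories", "tales", "prayer", "appearance", "explore"].any
      (fun k => PySem.Str.isIn k text)) then "socializing"
  else if (["work", "duty", "patrol", "training", "drills", "trade", "forg", "harvest", "field", "chores", "tasks", "business", "court"].any
      (fun k => PySem.Str.isIn k text)) then "working"
  -- fallback by zone type
  else if zone_name == some "town_square" then "socializing"
  else if (match zone_name with
           | none => false
           | some z => z != "" &&  -- Python truthiness of zone_name
               (PySem.Str.startswith z "noble_house_" || PySem.Str.startswith z "peasant_house_" || PySem.Str.startswith z "trader_house_"))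
    then "sleeping"
  else "working"

-- ===== PORT B =====
-- flat keyword → priority table (_KEYWORD_PRIORITY, insertion order)
def pvKeywordPriority : List (String × Int) :=
  [("sleep", 0), ("rest", 0), ("retire", 0), ("chambers", 0), ("go home", 0), ("return home", 0),
   ("lunch", 1), ("meal", 1), ("eat", 1), ("dinner", 1), ("breakfast", 1),
   ("social", 2), ("visit", 2), ("stories", 2), ("tales", 2), ("prayer", 2), ("appearance", 2), ("explore", 2),
   ("work", 3), ("duty", 3), ("patrol", 3), ("training", 3), ("drills", 3), ("trade", 3), ("forg", 3),
   ("harvest", 3), ("field", 3), ("chores", 3), ("tasks", 3), ("business", 3), ("court", 3)]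

def pvStates : List String := ["sleeping", "eating", "socializing", "working"]

def state_from_routine_activity_py_alt (activity_text : Option String) (zone_name : Option String) : String :=
  let text := PySem.Str.lower (activity_text.getD "")
  -- the accumulator loop: best = min priority among matched keywords, 4 = sentinel
  let best : Int := pvKeywordPriority.foldl
    (fun best kp => if kp.2 < best ∧ PySem.Str.isIn kp.1 text = true then kp.2 else best) 4
  if best < 4 then (PySem.List.pyGet? pvStates best).getD ""   -- _STATES[best]; in range whenever best < 4
  else
    let zone := zone_name.getD ""
    if zone == "town_square" then "socializing"
    else if (["noble_house_", "peasant_house_", "trader_house_"].any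
        (fun p => PySem.Str.startswith zone p)) then "sleeping"
    else "working"

-- ===== PRECONDITION & SPEC =====
def Spec_state_from_routine_activity_py (activity_text : Option String) (zone_name : Option String) (out : String) : Prop := out = state_from_routine_activity_py_alt activity_text zone_name
instance (activity_text : Option String) (zone_name : Option String) (out : String) : Decidable (Spec_state_from_routine_activity_py activity_text zone_name out) := by unfold Spec_state_from_routine_activity_py; infer_instance

-- ===== CLAIM =====
def Claim_equal_state_from_routine_activity_py : Prop := ∀ (activity_text : Option String) (zone_name : Option String), Dom_state_from_routine_activity_py activity_text zone_name → Spec_state_from_routine_activity_py activity_text zone_name (state_from_routine_activity_py activity_text zone_name)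

-- ===== LEMMAS AND PROOFS =====
-- folding B's accumulator step over one constant-priority keyword group (abstract match predicate m)
lemma fold_group (m : String → Bool) (ks : List String) (p : Int) :
    ∀ b : Int, (ks.map (fun k => (k, p))).foldl
      (fun best kp => if kp.2 < best ∧ m kp.1 = true then kp.2 else best) b
    = if p < b ∧ ks.any m = true then p else b := by
  induction ks with
  | nil => intro b; simp
  | cons k ks ih =>
    intro b
    simp only [List.map_cons, List.foldl_cons, List.any_cons, Bool.or_eq_true]
    by_cases hp : p < b
    · by_cases hk : m k = true
      · rw [if_pos ⟨hp, hk⟩, ih p, if_neg (fun h => lt_irrefl p h.1), if_pos ⟨hp, Or.inl hk⟩]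
      · rw [if_neg (fun h => hk h.2), ih b]
        by_cases ha : ks.any m = true
        · rw [if_pos ⟨hp, ha⟩, if_pos ⟨hp, Or.inr ha⟩]
        · rw [if_neg (fun h => ha h.2), if_neg (fun h => h.2.elim hk ha)]
    · rw [if_neg (fun h => hp h.1), ih b, if_neg (fun h => hp h.1), if_neg (fun h => hp h.1)]

-- the minimum-priority fold equals the first-matching-group selection
lemma best_eq (m : String → Bool) :
    pvKeywordPriority.foldl
      (fun best kp => if kp.2 < best ∧ m kp.1 = true then kp.2 else best) 4
    = (if (["sleep", "rest", "retire", "chambers", "go home", "return home"].any m) then (0 : Int)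
       else if (["lunch", "meal", "eat", "dinner", "breakfast"].any m) then 1
       else if (["social", "visit", "stories", "tales", "prayer", "appearance", "explore"].any m) then 2
       else if (["work", "duty", "patrol", "training", "drills", "trade", "forg", "harvest", "field", "chores", "tasks", "business", "court"].any m) then 3
       else 4) := by
  have hsplit : pvKeywordPriority
      = (["sleep", "rest", "retire", "chambers", "go home", "return home"].map (fun k => (k, (0 : Int))))
        ++ (["lunch", "meal", "eat", "dinner", "breakfast"].map (fun k => (k, (1 : Int))))
        ++ (["social", "visit", "stories", "tales", "prayer", "appearance", "explore"].map (fun k => (k, (2 : Int))))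
        ++ (["work", "duty", "patrol", "training", "drills", "trade", "forg", "harvest", "field", "chores", "tasks", "business", "court"].map (fun k => (k, (3 : Int)))) := rfl
  rw [hsplit, List.foldl_append, List.foldl_append, List.foldl_append,
    fold_group, fold_group, fold_group, fold_group]
  by_cases h0 : (["sleep", "rest", "retire", "chambers", "go home", "return home"].any m) = true <;>
    by_cases h1 : (["lunch", "meal", "eat", "dinner", "breakfast"].any m) = true <;>
    by_cases h2 : (["social", "visit", "stories", "tales", "prayer", "appearance", "explore"].any m) = true <;>
    by_cases h3 : (["work", "duty", "patrol", "training", "drills", "trade", "forg", "harvest", "field", "chores", "tasks", "business", "court"].any m) = true <;>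
    simp [h0, h1, h2, h3]

-- the two zone fallbacks agree
lemma fallback_eq (zone_name : Option String) :
    (if zone_name == some "town_square" then "socializing"
     else if (match zone_name with
              | none => false
              | some z => z != "" &&
                  (PySem.Str.startswith z "noble_house_" || PySem.Str.startswith z "peasant_house_" || PySem.Str.startswith z "trader_house_"))
       then "sleeping"
     else "working")
    = (if zone_name.getD "" == "town_square" then "socializing"
       else if (["noble_house_", "peasant_house_", "trader_house_"].any
           (fun p => PySem.Str.startswith (zone_name.getD "") p)) then "sleeping"
       else "working") := by
  cases zone_name with
  | none => rfl
  | some z =>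
    by_cases hz : z = ""
    · subst hz; rfl
    · have hz' : (z != "") = true := by simpa using hz
      simp only [Option.getD_some, Option.some.injEq, beq_iff_eq, List.any_cons, List.any_nil,
        Bool.or_false, hz', Bool.true_and, Bool.or_assoc]

-- ===== VERDICT =====
theorem state_from_routine_activity_py_spec : Claim_equal_state_from_routine_activity_py := by
  intro a z _
  unfold Spec_state_from_routine_activity_py
  simp only [state_from_routine_activity_py, state_from_routine_activity_py_alt]
  rw [best_eq (fun k => PySem.Str.isIn k (PySem.Str.lower (a.getD "")))]
  by_cases h0 : (["sleep", "rest", "retire", "chambers", "go home", "return home"].any (fun k => PySem.Str.isIn k (PySem.Str.lower (a.getD "")))) = true <;>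
    by_cases h1 : (["lunch", "meal", "eat", "dinner", "breakfast"].any (fun k => PySem.Str.isIn k (PySem.Str.lower (a.getD "")))) = true <;>
    by_cases h2 : (["social", "visit", "stories", "tales", "prayer", "appearance", "explore"].any (fun k => PySem.Str.isIn k (PySem.Str.lower (a.getD "")))) = true <;>
    by_cases h3 : (["work", "duty", "patrol", "training", "drills", "trade", "forg", "harvest", "field", "chores", "tasks", "business", "court"].any (fun k => PySem.Str.isIn k (PySem.Str.lower (a.getD "")))) = true <;>
    simp only [h0, h1, h2, h3, if_true, if_false, Bool.false_eq_true] <;>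
    first
      | rfl
      | exact fallback_eq z
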